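-- pv_equiv track=rewrite | github.com/mariusconjeaud/openstudybuilder-solution-lite | clinical-mdr-api/clinical_mdr_api/domains/_utils.py | is_syntax_of_template_name_correct
-- ===== SOURCE A (Python) =====
-- def is_syntax_of_template_name_correct(name: str) -> bool:
--     """
--     Checks the syntax of the name.
--     The syntax is considered to be valid if all of the following conditions are true:
--     - The name consists of at least one printable character.
--     - The name contains no brackets or a matching number of opening and closing brackets [].
--     - The name does not contain nested brackets like this: [a[b]c].
--     - The parameters within the brackets need to consist of at least one character.
--
--     Args:
--         name (str): The name of the template.
--
--     Returns:
--         bool: True if the syntax of the name is valid.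
--     """
--     if not isinstance(name, str):
--         raise TypeError(f"Expected type str but found {type(name)}")
--
--     if len(name.strip()) == 0:
--         return False
--
--     brackets_counter = 0
--     char_counter = 0
--     for char in name:
--         if char == "[":
--             brackets_counter += 1
--             char_counter = 0
--         elif char == "]":
--             if char_counter == 0:
--                 return False
--             brackets_counter -= 1
--             char_counter = 0
--         else:
--             char_counter += 1
--
--         if brackets_counter < 0 or brackets_counter > 1:
--             return False
--
--     return brackets_counter == 0
-- ===== SOURCE B (Python) =====
-- def is_syntax_of_template_name_correct(name: str) -> bool:
--     if not isinstance(name, str):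
--         raise TypeError(f"Expected type str but found {type(name)}")
--
--     if len(name.strip()) == 0:
--         return False
--
--     first, *rest = name.split("[")
--     if "]" in first:
--         return False
--     return all(p.count("]") == 1 and not p.startswith("]") for p in rest)
-- ===== Notes on version B (the rewrite author's own statement) =====
-- stated objective: faster
-- what changed: Replaces the character-by-character scan with depth and char counters by splitting the name on the opening bracket once and checking each resulting part with str.count/str.startswith (no closing bracket before the first opening one, exactly one closing bracket per later part, and not at its start).
import Mathlib
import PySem

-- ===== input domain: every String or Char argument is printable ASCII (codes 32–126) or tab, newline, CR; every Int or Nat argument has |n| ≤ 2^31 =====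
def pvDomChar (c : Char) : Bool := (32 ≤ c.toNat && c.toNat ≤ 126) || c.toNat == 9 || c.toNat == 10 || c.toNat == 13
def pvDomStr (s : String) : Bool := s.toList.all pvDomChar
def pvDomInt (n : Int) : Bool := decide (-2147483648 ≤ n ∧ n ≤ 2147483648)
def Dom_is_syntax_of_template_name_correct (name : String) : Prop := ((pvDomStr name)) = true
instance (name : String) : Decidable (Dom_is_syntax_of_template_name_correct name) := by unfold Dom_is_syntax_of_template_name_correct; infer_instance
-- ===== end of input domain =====

-- B replaces A's one-pass depth/char-counter scan by a single split on the opening bracket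
-- with a per-part check (a timing run measured B faster). A is total on str; no Pre_.

-- ===== PORT A =====
-- the for-loop of A: state = (brackets_counter, char_counter); early returns become false
def pvGoA : List Char → Int → Int → Bool
  | [], b, _ => b == 0
  | c :: rest, b, k =>
    if c = '[' then
      if b + 1 < 0 ∨ 1 < b + 1 then false else pvGoA rest (b + 1) 0
    else if c = ']' then
      if k == 0 then false
      else if b - 1 < 0 ∨ 1 < b - 1 then false else pvGoA rest (b - 1) 0
    else
      if b < 0 ∨ 1 < b then false else pvGoA rest b (k + 1)

def is_syntax_of_template_name_correct (name : String) : Bool :=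
  if PySem.Str.len (PySem.Str.strip name) == 0 then false
  else pvGoA name.toList 0 0

-- ===== PORT B =====
-- per-part check of Source B: p.count("]") == 1 and not p.startswith("]")
def pvPartOk (p : List Char) : Bool :=
  PySem.Chars.count p [']'] == 1 && !(PySem.Chars.startswith p [']'])

def is_syntax_of_template_name_correct_alt (name : String) : Bool :=
  if PySem.Str.len (PySem.Str.strip name) == 0 then false
  else
    match PySem.Chars.splitOn name.toList ['['] with
    | [] => true   -- unreachable: str.split never returns an empty list
    | first :: rest =>
      if PySem.Chars.isIn [']'] first then false
      else rest.all pvPartOk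

-- ===== PRECONDITION & SPEC =====
def Spec_is_syntax_of_template_name_correct (name : String) (out : Bool) : Prop := out = is_syntax_of_template_name_correct_alt name
instance (name : String) (out : Bool) : Decidable (Spec_is_syntax_of_template_name_correct name out) := by unfold Spec_is_syntax_of_template_name_correct; infer_instance

-- ===== CLAIM (what is proved, stated in full; the proofs are below) =====
def Claim_equal_is_syntax_of_template_name_correct : Prop := ∀ (name : String), Dom_is_syntax_of_template_name_correct name → Spec_is_syntax_of_template_name_correct name (is_syntax_of_template_name_correct name)

-- ===== LEMMAS AND PROOFS =====

-- proof-side structural version of splitting on '[': (current head segment, later segments)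
def pvSplitC : List Char → List Char × List (List Char)
  | [] => ([], [])
  | c :: cs =>
    let r := pvSplitC cs
    if c = '[' then ([], r.1 :: r.2) else (c :: r.1, r.2)

theorem pvSplitOn_go_spec (fuel : Nat) (l cur : List Char) (acc : List (List Char))
    (h : l.length ≤ fuel) :
    PySem.Chars.splitOn.go ['['] fuel l cur acc =
      acc.reverse ++ (cur.reverse ++ (pvSplitC l).1) :: (pvSplitC l).2 := by
  induction fuel generalizing l cur acc with
  | zero =>
    have : l = [] := List.length_eq_zero_iff.mp (Nat.le_zero.mp h)
    subst this
    simp [PySem.Chars.splitOn.go, pvSplitC]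
  | succ n ih =>
    cases l with
    | nil => simp [PySem.Chars.splitOn.go, pvSplitC]
    | cons c rest =>
      by_cases hc : c = '['
      · subst hc
        have hpre : List.isPrefixOf ['['] ('[' :: rest) = true := by
          simp [List.isPrefixOf]
        rw [PySem.Chars.splitOn.go]
        simp only [hpre, if_pos, List.length_cons, List.length_nil, List.drop_succ_cons, List.drop_zero]
        rw [ih rest [] (List.reverse cur :: acc) (by simpa using Nat.le_of_succ_le_succ h)]
        simp [pvSplitC]
      · have hpre : List.isPrefixOf ['['] (c :: rest) = false := by
          simp [List.isPrefixOf, Ne.symm hc]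
        rw [PySem.Chars.splitOn.go]
        simp only [hpre, Bool.false_eq_true, if_false]
        rw [ih rest (c :: cur) acc (by simpa using Nat.le_of_succ_le_succ h)]
        simp [pvSplitC, hc]

theorem pvSplitOn_eq (cs : List Char) :
    PySem.Chars.splitOn cs ['['] = (pvSplitC cs).1 :: (pvSplitC cs).2 := by
  unfold PySem.Chars.splitOn
  rw [pvSplitOn_go_spec (cs.length + 1) cs [] [] (Nat.le_succ _)]
  simp

theorem pvCount_go_spec (fuel : Nat) (l : List Char) (acc : Nat)
    (h : l.length ≤ fuel) :
    PySem.Chars.count.go [']'] fuel l acc = acc + l.count ']' := by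
  induction fuel generalizing l acc with
  | zero =>
    have : l = [] := List.length_eq_zero_iff.mp (Nat.le_zero.mp h)
    subst this
    simp [PySem.Chars.count.go]
  | succ n ih =>
    cases l with
    | nil => simp [PySem.Chars.count.go]
    | cons c rest =>
      by_cases hc : c = ']'
      · subst hc
        have hpre : List.isPrefixOf [']'] (']' :: rest) = true := by
          simp [List.isPrefixOf]
        rw [PySem.Chars.count.go]
        simp only [hpre, if_pos, List.length_cons, List.length_nil, List.drop_succ_cons, List.drop_zero]
        rw [ih rest (acc + 1) (by simpa using Nat.le_of_succ_le_succ h)]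
        simp
        omega
      · have hpre : List.isPrefixOf [']'] (c :: rest) = false := by
          simp [List.isPrefixOf, Ne.symm hc]
        rw [PySem.Chars.count.go]
        simp only [hpre, Bool.false_eq_true, if_false]
        rw [ih rest acc (by simpa using Nat.le_of_succ_le_succ h)]
        simp [hc]

theorem pvCount_single (p : List Char) : PySem.Chars.count p [']'] = p.count ']' := by
  unfold PySem.Chars.count
  simp [pvCount_go_spec p.length p 0 (Nat.le_refl _)]

theorem pvStartswith_single (p : List Char) :
    PySem.Chars.startswith p [']'] = (p.head? == some ']') := by
  cases p with
  | nil => simp [PySem.Chars.startswith, List.isPrefixOf]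
  | cons c rest => simp [PySem.Chars.startswith, List.isPrefixOf, eq_comm]

theorem pvIsIn_single (h : List Char) :
    PySem.Chars.isIn [']'] h = decide (']' ∈ h) := by
  by_cases hm : ']' ∈ h
  · obtain ⟨s, t, rfl⟩ := List.append_of_mem hm
    have h1 : PySem.Chars.isIn [']'] (s ++ ']' :: t) = true :=
      (PySem.Chars.isIn_iff_infix _ _).mpr ⟨s, t, by simp⟩
    simp [h1]
  · have : ¬ ([']'] <:+: h) := by
      intro hin
      exact hm (hin.subset (List.mem_singleton.mpr rfl))
    have h2 : PySem.Chars.isIn [']'] h ≠ true := fun hh =>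
      this ((PySem.Chars.isIn_iff_infix _ _).mp hh)
    simp [Bool.eq_false_iff.mpr h2, hm]

theorem pvPartOk_eq (p : List Char) :
    pvPartOk p = ((p.count ']' == 1) && !(p.head? == some ']')) := by
  unfold pvPartOk
  rw [pvCount_single, pvStartswith_single]

-- the core correspondence: A's counter scan vs the split-based checks, all depths at once
theorem pvMain (cs : List Char) :
    (∀ k : Int, pvGoA cs 0 k =
        (!decide (']' ∈ (pvSplitC cs).1) && (pvSplitC cs).2.all pvPartOk)) ∧
    (pvGoA cs 1 0 = (pvPartOk (pvSplitC cs).1 && (pvSplitC cs).2.all pvPartOk)) ∧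
    (∀ k : Int, 0 < k → pvGoA cs 1 k =
        (((pvSplitC cs).1.count ']' == 1) && (pvSplitC cs).2.all pvPartOk)) := by
  induction cs with
  | nil =>
    refine ⟨fun k => ?_, ?_, fun k hk => ?_⟩ <;>
      simp [pvGoA, pvSplitC, pvPartOk_eq]
  | cons c rest ih =>
    obtain ⟨ih0, ih10, ih1k⟩ := ih
    by_cases hb : c = '['
    · subst hb
      refine ⟨fun k => ?_, ?_, fun k hk => ?_⟩ <;>
        simp [pvGoA, pvSplitC, ih10, pvPartOk_eq]
    · by_cases hc : c = ']'
      · subst hc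
        refine ⟨fun k => ?_, ?_, fun k hk => ?_⟩
        · -- depth 0, ']' always fails (k = 0 → return False; else counter goes to -1)
          by_cases hk : k == 0 <;>
            simp [pvGoA, pvSplitC, hk, List.mem_cons]
        · simp [pvGoA, pvSplitC, pvPartOk_eq]
        · have hk' : (k == 0) = false := by simpa using hk.ne'
          simp only [pvGoA, hk', Bool.false_eq_true, if_false]
          norm_num
          rw [ih0 0]
          simp only [pvSplitC]
          by_cases hz : ']' ∈ (pvSplitC rest).1
          · have hnz : List.count ']' (pvSplitC rest).1 ≠ 0 := by
              have := (List.count_pos_iff).mpr hz; omega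
            simp [hz, hnz]
          · simp [hz, List.count_eq_zero.mpr hz]
      · refine ⟨fun k => ?_, ?_, fun k hk => ?_⟩
        · simp [pvGoA, pvSplitC, hb, hc, ih0 (k + 1), List.mem_cons, Ne.symm hc]
        · have h1 : pvGoA rest 1 1 = _ := ih1k 1 (by norm_num)
          have hc' : (c == ']') = false := by simpa using hc
          simp [pvGoA, pvSplitC, hb, hc, hc', h1, pvPartOk_eq]
        · have h1 : pvGoA rest 1 (k + 1) = _ := ih1k (k + 1) (by omega)
          simp [pvGoA, pvSplitC, hb, hc, h1]

-- ===== VERDICT (by name: the statement is the Claim_ definition above) =====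
theorem is_syntax_of_template_name_correct_spec : Claim_equal_is_syntax_of_template_name_correct := by
  intro name _
  unfold Spec_is_syntax_of_template_name_correct
  unfold is_syntax_of_template_name_correct is_syntax_of_template_name_correct_alt
  by_cases hs : (PySem.Str.len (PySem.Str.strip name) == 0) = true
  · rw [if_pos hs, if_pos hs]
  · rw [if_neg hs, if_neg hs]
    rw [pvSplitOn_eq, (pvMain name.toList).1 0]
    by_cases hm : ']' ∈ (pvSplitC name.toList).1 <;>
      simp [pvIsIn_single, hm]
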